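-- pv_equiv track=rewrite | github.com/wpf68/Codingame | 241111_Playing_Card_Odds/PlayingCardOdds.py | typeClean
-- ===== SOURCE A (Python) =====
-- listCard = "23456789TJQKA"
--
-- def typeClean(removed):
--     delClean = []
--     i = 0
--     while i < len(removed):
--         if removed[i] in listCard:
--             if i + 1 < len(removed) and removed[i + 1] in "CDHS":
--                 delClean.append(removed[i:i+2])
--                 i += 1
--                 # continue
--             else:
--                 delClean.append(removed[i])
--         elif removed[i] in "CDHS":
--             delClean.append(removed[i])
--         i += 1
--
--
--     return delClean
-- ===== SOURCE B (Python) =====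
-- import re
--
-- _TOKEN = re.compile(r'[23456789TJQKA][CDHS]?|[CDHS]')
--
-- def typeClean(removed):
--     # One regex pass: a rank optionally grabs a following suit, a lone suit
--     # matches by itself, everything else is skipped.
--     return _TOKEN.findall(removed)
-- ===== Notes on version B (the rewrite author's own statement) =====
-- stated objective: faster
-- what changed: Replaces the manual while-loop with index bookkeeping by a single regular-expression pass (re.findall with a rank-optional-suit | suit pattern), whose scan runs in C.
import Mathlib
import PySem

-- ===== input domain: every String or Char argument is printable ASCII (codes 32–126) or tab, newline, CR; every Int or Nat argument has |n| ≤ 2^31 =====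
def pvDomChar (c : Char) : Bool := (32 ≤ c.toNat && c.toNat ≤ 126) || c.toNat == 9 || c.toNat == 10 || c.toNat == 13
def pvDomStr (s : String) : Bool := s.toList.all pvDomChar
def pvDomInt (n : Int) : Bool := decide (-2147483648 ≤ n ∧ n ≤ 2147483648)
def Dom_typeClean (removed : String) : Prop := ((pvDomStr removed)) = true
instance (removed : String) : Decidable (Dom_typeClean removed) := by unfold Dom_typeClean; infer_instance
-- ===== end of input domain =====

-- B replaces the manual index-bookkeeping while-loop with one re.findall pass; same O(n) work, measurably faster constant factor (C regex engine).


-- ===== PORT A =====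
-- 'removed[i] in listCard' for the single character removed[i] is exactly list membership (exact on single chars)
def inRank (c : Char) : Bool := "23456789TJQKA".toList.contains c
def inSuit (c : Char) : Bool := "CDHS".toList.contains c

-- the while-loop of A: index i, accumulator delClean
def typeCleanGo (cs : List Char) (i : Nat) (acc : List String) : List String :=
  if h : i < cs.length then
    if inRank cs[i] then
      if h2 : i + 1 < cs.length then
        if inSuit cs[i + 1] then
          -- delClean.append(removed[i:i+2]); i += 1; then i += 1
          typeCleanGo cs (i + 1 + 1) (acc ++ [String.ofList (PySem.List.slice cs (some (i : Int)) (some ((i : Int) + 2)))])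
        else
          typeCleanGo cs (i + 1) (acc ++ [String.ofList [cs[i]]])
      else
        typeCleanGo cs (i + 1) (acc ++ [String.ofList [cs[i]]])
    else if inSuit cs[i] then
      typeCleanGo cs (i + 1) (acc ++ [String.ofList [cs[i]]])
    else
      typeCleanGo cs (i + 1) acc
  else
    acc
termination_by cs.length - i

def typeClean (removed : String) : List String :=
  typeCleanGo removed.toList 0 []

-- ===== PORT B =====
-- Source B uses re.findall(r'[23456789TJQKA][CDHS]?|[CDHS]', removed): Lean has no regex engine, so the
-- non-overlapping left-to-right scan of this fixed pattern is ported by hand, step for step (exact: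
-- findall tries alternatives in order at each position, the optional suit is greedy, non-matching
-- characters are skipped one at a time).
def scanTokens : List Char → List String
  | [] => []
  | c :: rest =>
    if inRank c then
      match rest with
      | [] => [String.ofList [c]]
      | d :: rest' =>
        if inSuit d then String.ofList [c, d] :: scanTokens rest'
        else String.ofList [c] :: scanTokens (d :: rest')
    else if inSuit c then
      String.ofList [c] :: scanTokens rest
    else
      scanTokens rest

def typeClean_alt (removed : String) : List String :=
  scanTokens removed.toList

-- ===== PRECONDITION & SPEC =====
def Spec_typeClean (removed : String) (out : List String) : Prop := out = typeClean_alt removed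
instance (removed : String) (out : List String) : Decidable (Spec_typeClean removed out) := by unfold Spec_typeClean; infer_instance

-- ===== CLAIM (what is proved, stated in full; the proofs are below) =====
def Claim_equal_typeClean : Prop := ∀ (removed : String), Dom_typeClean removed → Spec_typeClean removed (typeClean removed)

-- ===== LEMMAS AND PROOFS =====

lemma slice_two (cs : List Char) (i : Nat) (h2 : i + 1 < cs.length) :
    PySem.List.slice cs (some (i : Int)) (some ((i : Int) + 2)) = [cs[i], cs[i + 1]] := by
  have : ((i : Int) + 2) = ((i + 2 : Nat) : Int) := by push_cast; ring
  rw [this, PySem.List.slice_natCast]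
  have hd : cs.drop i = cs[i] :: cs.drop (i + 1) := List.drop_eq_getElem_cons (by omega)
  have hd2 : cs.drop (i + 1) = cs[i + 1] :: cs.drop (i + 2) := List.drop_eq_getElem_cons h2
  have hn : i + 2 - i = 2 := by omega
  rw [hd, hd2, hn]
  rfl

lemma go_eq_scan (cs : List Char) (i : Nat) (acc : List String) :
    typeCleanGo cs i acc = acc ++ scanTokens (cs.drop i) := by
  by_cases h : i < cs.length
  · have hd : cs.drop i = cs[i] :: cs.drop (i + 1) := List.drop_eq_getElem_cons h
    rw [typeCleanGo]
    simp only [dif_pos h]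
    by_cases hr : inRank cs[i]
    · simp only [if_pos hr]
      by_cases h2 : i + 1 < cs.length
      · have hd2 : cs.drop (i + 1) = cs[i + 1] :: cs.drop (i + 2) := List.drop_eq_getElem_cons h2
        simp only [dif_pos h2]
        by_cases hs : inSuit cs[i + 1]
        · rw [if_pos hs, go_eq_scan cs (i + 1 + 1) _, slice_two cs i h2, hd, hd2]
          simp only [scanTokens]
          simp [hr, hs]
        · rw [if_neg hs, go_eq_scan cs (i + 1) _, hd, hd2]
          simp [scanTokens, hr, hs]
      · have hnil : cs.drop (i + 1) = [] := List.drop_eq_nil_of_le (by omega)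
        simp only [dif_neg h2]
        rw [go_eq_scan cs (i + 1) _, hd, hnil]
        simp only [scanTokens]
        simp [hr]
    · simp only [if_neg hr]
      by_cases hs : inSuit cs[i]
      · rw [if_pos hs, go_eq_scan cs (i + 1) _, hd]
        cases hc2 : cs.drop (i + 1) <;> simp [scanTokens, hr, hs]
      · rw [if_neg hs, go_eq_scan cs (i + 1) _, hd]
        cases hc2 : cs.drop (i + 1) <;> simp [scanTokens, hr, hs]
  · rw [typeCleanGo]
    simp only [dif_neg h, List.drop_eq_nil_of_le (by omega : cs.length ≤ i), scanTokens, List.append_nil]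
termination_by cs.length - i

-- ===== VERDICT (by name: the statement is the Claim_ definition above) =====
theorem typeClean_spec : Claim_equal_typeClean := by
  intro removed _
  unfold Spec_typeClean typeClean typeClean_alt
  rw [go_eq_scan]
  simp
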